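-- pv_equiv track=rewrite | github.com/sudohq/celerey_test | main/tasks.py | get_site
-- ===== SOURCE A (Python) =====
-- def get_site(url):
--     spl = url.split('/')
--     site = None
--     url_len = 0
--
--     if '@' in url:
--
--         for res in spl:
--
--             if '@' in res:
--                 break
--             else:
--                 url_len += len(res)+1
--
--         if url_len > 0:
--             site = 'http://%s' % url[:url_len]
--             return site
--
--     return site
-- ===== SOURCE B (Python) =====
-- def get_site(url):
--     if '@' not in url:
--         return None
--     at = url.index('@')
--     start = url.rfind('/', 0, at) + 1
--     if start > 0:
--         return 'http://%s' % url[:start]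
--     return None
-- ===== Notes on version B (the rewrite author's own statement) =====
-- stated objective: simpler
-- what changed: Replaced A's split('/')-then-accumulate-segment-lengths loop by two direct searches: the first '@' (str.index) and the last '/' before it (str.rfind), which give the prefix length directly.
import Mathlib
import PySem

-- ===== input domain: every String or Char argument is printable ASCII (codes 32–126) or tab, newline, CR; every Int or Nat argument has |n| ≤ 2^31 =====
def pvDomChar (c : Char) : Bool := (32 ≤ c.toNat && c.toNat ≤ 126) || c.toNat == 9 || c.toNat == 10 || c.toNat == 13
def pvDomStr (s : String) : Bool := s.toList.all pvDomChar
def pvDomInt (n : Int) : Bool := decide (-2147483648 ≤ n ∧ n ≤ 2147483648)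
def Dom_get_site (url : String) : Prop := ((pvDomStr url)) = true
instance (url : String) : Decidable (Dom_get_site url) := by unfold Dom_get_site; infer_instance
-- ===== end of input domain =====

-- B replaces A's split-the-URL-and-accumulate-segment-lengths loop by two direct
-- string searches (first '@', last '/' before it); objective: simpler.

-- ===== PORT A =====
-- the 'for res in spl: if '@' in res: break else: url_len += len(res)+1' loop
def getSiteLoop : List (List Char) → Nat → Nat
  | [], n => n
  | r :: rest, n => if PySem.Chars.isIn ['@'] r then n else getSiteLoop rest (n + r.length + 1)

def get_site (url : String) : Option String :=
  let spl := PySem.Chars.splitOn url.toList ['/']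
  if PySem.Chars.isIn ['@'] url.toList then
    let n := getSiteLoop spl 0
    if n > 0 then
      some (String.ofList ("http://".toList ++ PySem.Chars.slice url.toList none (some (n : Int))))
    else none
  else none

-- ===== PORT B =====
-- hand port of str.rfind(c, 0, at) restricted to a single-character needle,
-- applied to the slice url[:at]: the index of the LAST occurrence of c, -1 if absent (exact there)
def rfindChar : List Char → Char → Int
  | [], _ => -1
  | c :: t, x =>
    let r := rfindChar t x
    if r ≥ 0 then r + 1 else if c = x then 0 else -1

def get_site_alt (url : String) : Option String :=
  if PySem.Chars.isIn ['@'] url.toList then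
    let atIdx := PySem.Chars.find url.toList ['@']
    let start := rfindChar (PySem.Chars.slice url.toList none (some atIdx)) '/' + 1
    if start > 0 then
      some (String.ofList ("http://".toList ++ PySem.Chars.slice url.toList none (some start)))
    else none
  else none

-- ===== PRECONDITION & SPEC =====
def Spec_get_site (url : String) (out : Option String) : Prop := out = get_site_alt url
instance (url : String) (out : Option String) : Decidable (Spec_get_site url out) := by unfold Spec_get_site; infer_instance

-- ===== CLAIM (what is proved, stated in full; the proofs are below) =====
def Claim_equal_get_site : Prop := ∀ (url : String), Dom_get_site url → Spec_get_site url (get_site url)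

-- ===== LEMMAS AND PROOFS =====

-- fuel-free reformulation of PySem.Chars.splitOn with separator '/'
def splitF : List Char → List (List Char)
  | [] => [[]]
  | c :: cs => if c = '/' then [] :: splitF cs else (splitF cs).modifyHead (c :: ·)

theorem splitF_slash (cs : List Char) : splitF ('/' :: cs) = [] :: splitF cs := by
  simp [splitF]

theorem splitF_other (c : Char) (cs : List Char) (hc : c ≠ '/') :
    splitF (c :: cs) = (splitF cs).modifyHead (c :: ·) := by
  simp [splitF, hc]

theorem splitF_ne_nil (cs : List Char) : splitF cs ≠ [] := by
  induction cs with
  | nil => simp [splitF]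
  | cons c cs ih =>
    by_cases hc : c = '/'
    · subst hc; rw [splitF_slash]; simp
    · rw [splitF_other c cs hc]
      cases h : splitF cs with
      | nil => exact absurd h ih
      | cons hd tl => simp [List.modifyHead]

theorem prefixOf_slash_ne (c : Char) (rest : List Char) (hc : c ≠ '/') :
    (['/'] : List Char).isPrefixOf (c :: rest) = false := by
  simp [List.isPrefixOf]; exact fun h => hc h.symm

theorem splitOn_go_eq (fuel : Nat) (l : List Char) (h : l.length ≤ fuel)
    (cur : List Char) (acc : List (List Char)) :
    PySem.Chars.splitOn.go ['/'] fuel l cur acc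
      = acc.reverse ++ (splitF l).modifyHead (cur.reverse ++ ·) := by
  induction fuel generalizing l cur acc with
  | zero =>
    have hl : l = [] := List.eq_nil_of_length_eq_zero (Nat.le_zero.mp h)
    subst hl
    show ((cur.reverse ++ []) :: acc).reverse = _
    simp [splitF, List.modifyHead]
  | succ fuel ih =>
    cases l with
    | nil =>
      show (cur.reverse :: acc).reverse = _
      simp [splitF, List.modifyHead]
    | cons c rest =>
      show (if (['/'] : List Char).isPrefixOf (c :: rest)
            then PySem.Chars.splitOn.go ['/'] fuel rest [] (cur.reverse :: acc)
            else PySem.Chars.splitOn.go ['/'] fuel rest (c :: cur) acc) = _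
      simp only [List.length_cons] at h
      by_cases hc : c = '/'
      · subst hc
        rw [if_pos (by simp [List.isPrefixOf])]
        rw [ih rest (by omega) [] (cur.reverse :: acc), splitF_slash]
        simp only [List.modifyHead, List.reverse_cons, List.append_assoc]
        cases splitF rest <;> simp
      · rw [if_neg (by simp [prefixOf_slash_ne c rest hc])]
        rw [ih rest (by omega) (c :: cur) acc, splitF_other c rest hc]
        cases hs : splitF rest with
        | nil => exact absurd hs (splitF_ne_nil rest)
        | cons hd tl =>
          simp only [List.modifyHead, List.reverse_cons, List.append_assoc]
          cases hs2 : splitF rest <;> simp_all [List.modifyHead]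

theorem splitOn_eq_splitF (cs : List Char) :
    PySem.Chars.splitOn cs ['/'] = splitF cs := by
  unfold PySem.Chars.splitOn
  rw [splitOn_go_eq (cs.length + 1) cs (by omega) [] []]
  cases h : splitF cs with
  | nil => exact absurd h (splitF_ne_nil cs)
  | cons hd tl => simp [List.modifyHead]

theorem prefixOf_at_ne (c : Char) (rest : List Char) (hc : c ≠ '@') :
    (['@'] : List Char).isPrefixOf (c :: rest) = false := by
  simp [List.isPrefixOf]; exact fun h => hc h.symm

theorem find_go_at (l : List Char) (k : Nat) :
    PySem.Chars.find.go ['@'] l k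
      = if '@' ∈ l then ((k + l.idxOf '@' : Nat) : Int) else -1 := by
  induction l generalizing k with
  | nil => simp [PySem.Chars.find.go]
  | cons c t ih =>
    show (if (['@'] : List Char).isPrefixOf (c :: t) then ((k : Nat) : Int)
          else PySem.Chars.find.go ['@'] t (k + 1)) = _
    by_cases hc : c = '@'
    · subst hc
      rw [if_pos (by simp [List.isPrefixOf])]
      simp [List.idxOf_cons_self]
    · rw [if_neg (by simp [prefixOf_at_ne c t hc])]
      rw [ih (k + 1)]
      by_cases hm : '@' ∈ t
      · rw [if_pos hm, if_pos (by simp [hm])]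
        rw [List.idxOf_cons_ne _ (by simpa using hc)]
        push_cast; ring
      · rw [if_neg hm, if_neg (by simp [hm]; exact fun h => hc h.symm)]

theorem find_at (cs : List Char) :
    PySem.Chars.find cs ['@'] = if '@' ∈ cs then ((cs.idxOf '@' : Nat) : Int) else -1 := by
  unfold PySem.Chars.find
  rw [find_go_at cs 0]
  simp

theorem isIn_at (cs : List Char) : PySem.Chars.isIn ['@'] cs = decide ('@' ∈ cs) := by
  unfold PySem.Chars.isIn
  rw [find_at cs]
  by_cases h : '@' ∈ cs <;> simp [h]

theorem rfindChar_ge (l : List Char) (c : Char) : -1 ≤ rfindChar l c := by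
  induction l with
  | nil => simp [rfindChar]
  | cons a t ih => simp only [rfindChar]; split_ifs <;> omega

theorem rfindChar_nonneg_iff (l : List Char) (c : Char) : 0 ≤ rfindChar l c ↔ c ∈ l := by
  induction l with
  | nil => simp [rfindChar]
  | cons a t ih =>
    simp only [rfindChar, List.mem_cons]
    split_ifs with h1 h2
    · constructor
      · intro _; right; exact ih.mp h1
      · intro _; omega
    · subst h2; simp
    · have := rfindChar_ge t c
      constructor
      · intro hh; omega
      · rintro (rfl | hm)
        · exact absurd rfl h2
        · exact absurd (ih.mpr hm) (by omega)

-- accumulator additivity of A's loop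
theorem getSiteLoop_add (r : List (List Char)) (n : Nat) :
    getSiteLoop r n = n + getSiteLoop r 0 := by
  induction r generalizing n with
  | nil => simp [getSiteLoop]
  | cons h t ih =>
    simp only [getSiteLoop]
    split_ifs
    · rfl
    · rw [ih (n + h.length + 1), ih (0 + h.length + 1)]; omega

-- '@' is in the first segment of cs iff no '/' occurs before the first '@'
theorem head_splitF (cs : List Char) (h : '@' ∈ cs) :
    ('@' ∈ (splitF cs).headI) ↔ '/' ∉ cs.take (cs.idxOf '@') := by
  induction cs with
  | nil => cases h
  | cons c t ih =>
    by_cases hc : c = '@'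
    · subst hc
      rw [splitF_other '@' t (by decide), List.idxOf_cons_self]
      cases hs : splitF t with
      | nil => exact absurd hs (splitF_ne_nil t)
      | cons hd tl => simp [List.modifyHead]
    · have hm : '@' ∈ t := by
        cases List.mem_cons.mp h with
        | inl h1 => exact absurd h1.symm hc
        | inr h2 => exact h2
      rw [List.idxOf_cons_ne _ (by simpa using hc), List.take_succ_cons]
      by_cases hsl : c = '/'
      · subst hsl
        rw [splitF_slash]
        simp [List.headI]
      · rw [splitF_other c t hsl]
        cases hs : splitF t with
        | nil => exact absurd hs (splitF_ne_nil t)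
        | cons hd tl =>
          rw [hs] at ih
          simp only [List.modifyHead, List.headI, List.mem_cons] at ih ⊢
          constructor
          · intro hh hin
            rcases hh with hh | hh
            · exact hc hh.symm
            · rcases hin with h1 | h2
              · exact hsl h1.symm
              · exact (ih hm).mp hh h2
          · intro hnin
            right
            exact (ih hm).mpr (fun h2 => hnin (Or.inr h2))

-- the central offset identity: A's accumulated length = B's (rfind '/' in url[:at]) + 1
theorem main_eq (cs : List Char) (h : '@' ∈ cs) :
    (getSiteLoop (splitF cs) 0 : Int) = rfindChar (cs.take (cs.idxOf '@')) '/' + 1 := by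
  induction cs with
  | nil => cases h
  | cons c t ih =>
    by_cases hc : c = '@'
    · subst hc
      rw [splitF_other '@' t (by decide), List.idxOf_cons_self]
      cases hs : splitF t with
      | nil => exact absurd hs (splitF_ne_nil t)
      | cons hd tl =>
        simp [List.modifyHead, getSiteLoop, isIn_at, rfindChar]
    · have hm : '@' ∈ t := by
        cases List.mem_cons.mp h with
        | inl h1 => exact absurd h1.symm hc
        | inr h2 => exact h2
      rw [List.idxOf_cons_ne _ (by simpa using hc), List.take_succ_cons]
      by_cases hsl : c = '/'
      · subst hsl
        rw [splitF_slash]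
        have h1 : getSiteLoop ([] :: splitF t) 0 = 1 + getSiteLoop (splitF t) 0 := by
          simp only [getSiteLoop, isIn_at]
          rw [if_neg (by simp)]
          rw [getSiteLoop_add (splitF t) (0 + List.length ([] : List Char) + 1)]
          simp
        rw [h1]
        simp only [rfindChar]
        have hge := rfindChar_ge (t.take (t.idxOf '@')) '/'
        split_ifs with h2
        · push_cast; rw [ih hm]; ring
        · have he : rfindChar (t.take (t.idxOf '@')) '/' = -1 := by omega
          rw [he] at ih
          have := ih hm
          omega
      · rw [splitF_other c t hsl]
        cases hs : splitF t with
        | nil => exact absurd hs (splitF_ne_nil t)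
        | cons hd tl =>
          simp only [List.modifyHead]
          have hhead := head_splitF t hm
          rw [hs] at hhead
          simp only [List.headI] at hhead
          have hrfneg := rfindChar_ge (t.take (t.idxOf '@')) '/'
          have hrfiff := rfindChar_nonneg_iff (t.take (t.idxOf '@')) '/'
          by_cases hin : '@' ∈ hd
          · -- first segment contains '@': both sides are 0
            have hnos : '/' ∉ t.take (t.idxOf '@') := hhead.mp hin
            have he : rfindChar (t.take (t.idxOf '@')) '/' = -1 := by
              rcases lt_or_ge (rfindChar (t.take (t.idxOf '@')) '/') 0 with hlt | hge
              · omega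
              · exact absurd (hrfiff.mp hge) hnos
            simp only [getSiteLoop, isIn_at]
            rw [if_pos (by simp [hin])]
            simp only [rfindChar]
            rw [he, if_neg (by omega), if_neg hsl]
            simp
          · -- '@' is deeper: both sides are 1 + the value for t
            have hyes : '/' ∈ t.take (t.idxOf '@') := by
              by_contra hno
              exact hin (hhead.mpr hno)
            have hge0 : 0 ≤ rfindChar (t.take (t.idxOf '@')) '/' := hrfiff.mpr hyes
            have lstep : (getSiteLoop ((c :: hd) :: tl) 0 : Int)
                = 1 + getSiteLoop (hd :: tl) 0 := by
              simp only [getSiteLoop, isIn_at]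
              rw [if_neg (by simp [hin]; exact fun h => hc h.symm),
                  if_neg (by simp [hin])]
              rw [getSiteLoop_add tl (0 + (c :: hd).length + 1),
                  getSiteLoop_add tl (0 + hd.length + 1)]
              push_cast; simp; ring
            rw [lstep]
            simp only [rfindChar]
            rw [if_pos hge0]
            rw [hs] at ih
            have := ih hm
            omega

-- ===== VERDICT (by name: the statement is the Claim_ definition above) =====
theorem get_site_spec : Claim_equal_get_site := by
  intro url _
  unfold Spec_get_site get_site get_site_alt
  simp only [splitOn_eq_splitF, isIn_at]
  by_cases hm : '@' ∈ url.toList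
  · simp only [hm, decide_true, if_true]
    rw [find_at, if_pos hm]
    have hsl : PySem.Chars.slice url.toList none (some ((url.toList.idxOf '@' : Nat) : Int))
        = url.toList.take (url.toList.idxOf '@') := by
      simp [PySem.Chars.slice, PySem.List.slice_to_natCast]
    rw [hsl]
    have key := main_eq url.toList hm
    rw [← key]
    by_cases hpos : getSiteLoop (splitF url.toList) 0 > 0
    · rw [if_pos hpos, if_pos (by exact_mod_cast hpos)]
    · rw [if_neg hpos, if_neg (by omega)]
  · simp [hm]
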